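-- pv_equiv track=rewrite | github.com/hrishikeshtak/Coding_Practises_Solutions | hackerrank/si/heap/si-min-cost-to-connect-rods-inbuilt.py | min_cost_to_connect_rods
-- ===== SOURCE A (Python) =====
-- import heapq
--
-- def min_cost_to_connect_rods(arr, N):
--     # build min heap
--     heapq.heapify(arr)
--
--     ans = 0
--     while len(arr) != 1:
--         a = heapq.heappop(arr)
--         b = heapq.heappop(arr)
--
--         # insert into min heap
--         heapq.heappush(arr, (a+b))
--         ans += (a+b)
--     return ans
-- ===== SOURCE B (Python) =====
-- def min_cost_to_connect_rods(arr, N):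
--     # Sort once, then merge with two FIFO cursors: `rods` holds the sorted
--     # input, `sums` the generated merge-sums (produced in the order they are
--     # consumed); the two front elements of the cursors always contain the
--     # global minimum.  Does not mutate arr (A heapifies it in place).
--     rods = sorted(arr)
--     sums = []
--     i = j = 0
--     ans = 0
--     while (len(rods) - i) + (len(sums) - j) > 1:
--         a, i, j = _take_min(rods, sums, i, j)
--         b, i, j = _take_min(rods, sums, i, j)
--         sums.append(a + b)
--         ans += a + b
--     return ans
--
-- def _take_min(rods, sums, i, j):
--     if j == len(sums) or (i < len(rods) and rods[i] <= sums[j]):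
--         return rods[i], i + 1, j
--     return sums[j], i, j + 1
-- ===== Notes on version B (the rewrite author's own statement) =====
-- stated objective: faster
-- what changed: Replaces the binary heap (heapify/heappop/heappush) by sort-once plus two FIFO cursors over the sorted rods and the stream of generated merge-sums, taking each minimum by comparing the two fronts (O(1) per pick instead of O(log n) sift operations); also does not mutate arr in place.
import Mathlib
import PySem

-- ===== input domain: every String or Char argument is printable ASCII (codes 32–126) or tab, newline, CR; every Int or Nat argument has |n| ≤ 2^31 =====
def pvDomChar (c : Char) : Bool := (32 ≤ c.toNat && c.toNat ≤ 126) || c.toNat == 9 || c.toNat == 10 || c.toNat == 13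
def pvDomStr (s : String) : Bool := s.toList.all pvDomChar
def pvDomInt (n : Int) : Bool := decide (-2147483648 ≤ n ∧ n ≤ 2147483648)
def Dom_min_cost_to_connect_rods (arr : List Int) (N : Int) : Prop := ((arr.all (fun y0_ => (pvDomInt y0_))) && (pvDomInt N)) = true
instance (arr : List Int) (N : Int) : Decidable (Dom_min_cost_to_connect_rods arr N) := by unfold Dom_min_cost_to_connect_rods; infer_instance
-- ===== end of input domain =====

-- B replaces A's binary heap by sort-once plus two FIFO cursors; equivalence is about the
-- RETURN value only (A heapifies arr in place and leaves it as [total]; B does not mutate arr).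

-- ===== PORT A =====
-- heapq.heappop is ported by its contract: it removes and returns the minimum of the heap.
-- The heap's internal array layout never influences the returned `ans` (only the multiset of
-- elements does), so the heap is modelled as the plain list of its elements:
-- heappop = (min?, erase min), heappush = append.
def heapPop? (l : List Int) : Option (Int × List Int) :=
  match PySem.List.min? l (fun x => x) with
  | none => none
  | some m => some (m, l.erase m)

theorem heapPop?_length {l l' : List Int} {a : Int} (h : heapPop? l = some (a, l')) :
    l'.length + 1 = l.length := by
  unfold heapPop? at h
  cases hm : PySem.List.min? l (fun x => x) with
  | none => rw [hm] at h; exact absurd h (by simp)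
  | some m =>
    rw [hm] at h
    have hmem : m ∈ l := PySem.List.min?_mem hm
    have : l' = l.erase m := by cases h; rfl
    subst this
    have hpos : 0 < l.length := List.length_pos_of_mem hmem
    rw [List.length_erase_of_mem hmem]; omega

def aLoop (l : List Int) (ans : Int) : Int :=
  if l.length = 1 then ans
  else
    match h1 : heapPop? l with
    | none => ans        -- Python raises IndexError here (pop from empty heap); outside Pre_
    | some (a, l1) =>
      match h2 : heapPop? l1 with
      | none => ans      -- unreachable when arr ≠ []
      | some (b, l2) => aLoop (l2 ++ [a + b]) (ans + (a + b))
termination_by l.length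
decreasing_by
  have e1 := heapPop?_length h1
  have e2 := heapPop?_length h2
  simp; omega

def min_cost_to_connect_rods (arr : List Int) (N : Int) : Int :=
  aLoop arr 0

-- ===== PORT B =====
def takeMin (rods sums : List Int) (i j : Nat) : Int × Nat × Nat :=
  if j = sums.length ∨ (i < rods.length ∧ rods.getD i 0 ≤ sums.getD j 0) then
    (rods.getD i 0, i + 1, j)
  else
    (sums.getD j 0, i, j + 1)

-- fuel = number of rods bounds the number of merges (n - 1); it only makes the loop total.
def bLoop : Nat → List Int → List Int → Nat → Nat → Int → Int
  | 0, _, _, _, _, ans => ans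
  | fuel + 1, rods, sums, i, j, ans =>
    if (rods.length - i) + (sums.length - j) > 1 then
      let t1 := takeMin rods sums i j
      let t2 := takeMin rods sums t1.2.1 t1.2.2
      bLoop fuel rods (sums ++ [t1.1 + t2.1]) t2.2.1 t2.2.2 (ans + (t1.1 + t2.1))
    else ans

def min_cost_to_connect_rods_alt (arr : List Int) (N : Int) : Int :=
  bLoop arr.length (PySem.List.sorted arr (fun x => x)) [] 0 0 0

-- ===== PRECONDITION & SPEC =====
-- Pre_ excludes only the empty list, on which Python A raises IndexError.
def Pre_min_cost_to_connect_rods (arr : List Int) (N : Int) : Prop := arr ≠ []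
instance (arr : List Int) (N : Int) : Decidable (Pre_min_cost_to_connect_rods arr N) := by
  unfold Pre_min_cost_to_connect_rods; infer_instance

def pvWitness_min_cost_to_connect_rods : List Int × Int := ([1, 8, 3, 5], 4)


def Spec_min_cost_to_connect_rods (arr : List Int) (N : Int) (out : Int) : Prop := out = min_cost_to_connect_rods_alt arr N
instance (arr : List Int) (N : Int) (out : Int) : Decidable (Spec_min_cost_to_connect_rods arr N out) := by unfold Spec_min_cost_to_connect_rods; infer_instance

-- ===== CLAIM (what is proved, stated in full; the proofs are below) =====
def Claim_equal_min_cost_to_connect_rods : Prop := ∀ (arr : List Int) (N : Int), Dom_min_cost_to_connect_rods arr N → Pre_min_cost_to_connect_rods arr N → Spec_min_cost_to_connect_rods arr N (min_cost_to_connect_rods arr N)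


-- ===== LEMMAS AND PROOFS =====

-- if a ∈ l and x survives erasing a, then a survives erasing x (multiset counting)
theorem mem_erase_comm_of_mem {l : List Int} {a x : Int} (ha : a ∈ l) (hx : x ∈ l.erase a) :
    a ∈ l.erase x := by
  by_cases hax : a = x
  · subst hax; exact hx
  · rw [← List.count_pos_iff] at ha ⊢
    rw [List.count_erase]
    simp only [beq_iff_eq, Ne.symm hax, if_false]
    omega

-- erasing an extra element first only removes more
theorem mem_erase_of_mem_erase_erase {l : List Int} {c x y : Int}
    (h : y ∈ (l.erase c).erase x) : y ∈ l.erase x := by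
  rw [← List.count_pos_iff] at h ⊢
  rw [List.count_erase] at h ⊢
  rw [List.count_erase] at h
  split_ifs at h ⊢ with h1 <;> omega

-- membership in (xs ++ [s]).erase s lands in xs
theorem mem_append_singleton_erase_self {xs : List Int} {s y : Int}
    (h : y ∈ (xs ++ [s]).erase s) : y ∈ xs := by
  by_cases hs : s ∈ xs
  · rw [List.erase_append_left _ hs] at h
    rcases List.mem_append.1 h with h' | h'
    · exact List.mem_of_mem_erase h'
    · simp at h'; subst h'; exact hs
  · rw [List.erase_append_right _ hs] at h
    simpa using h
  

theorem drop_subset_drop {s : List Int} {j j' : Nat} (h : j ≤ j') {x : Int}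
    (hx : x ∈ s.drop j') : x ∈ s.drop j := by
  have : s.drop j' = (s.drop j).drop (j' - j) := by
    rw [List.drop_drop]; congr 1; omega
  rw [this] at hx
  exact List.drop_subset _ _ hx

-- the two-cursor pick returns the minimum of the live elements and advances one cursor
theorem takeMin_spec (rods sums : List Int) (i j : Nat)
    (hi : i ≤ rods.length) (hj : j ≤ sums.length)
    (hsr : (rods.drop i).Pairwise (· ≤ ·))
    (hss : (sums.drop j).Pairwise (· ≤ ·))
    (hne : rods.drop i ++ sums.drop j ≠ []) :
    (takeMin rods sums i j).2.1 ≤ rods.length ∧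
    (takeMin rods sums i j).2.2 ≤ sums.length ∧
    j ≤ (takeMin rods sums i j).2.2 ∧
    (takeMin rods sums i j).1 ∈ rods.drop i ++ sums.drop j ∧
    (∀ y ∈ rods.drop i ++ sums.drop j, (takeMin rods sums i j).1 ≤ y) ∧
    rods.drop (takeMin rods sums i j).2.1 ++ sums.drop (takeMin rods sums i j).2.2
      = (rods.drop i ++ sums.drop j).erase (takeMin rods sums i j).1 ∧
    (rods.drop (takeMin rods sums i j).2.1).Pairwise (· ≤ ·) ∧
    (sums.drop (takeMin rods sums i j).2.2).Pairwise (· ≤ ·) := by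
  unfold takeMin
  by_cases hc : j = sums.length ∨ (i < rods.length ∧ rods.getD i 0 ≤ sums.getD j 0)
  · rw [if_pos hc]
    dsimp only
    have hi' : i < rods.length := by
      rcases hc with hc | hc
      · subst hc
        simp only [List.drop_length, List.append_nil] at hne
        by_contra h
        exact hne (List.drop_eq_nil_of_le (by omega))
      · exact hc.1
    have hget : rods.getD i 0 = rods[i] := List.getD_eq_getElem rods 0 hi'
    have hdrop : rods.drop i = rods[i] :: rods.drop (i + 1) := List.drop_eq_getElem_cons hi'
    have hmin_r : ∀ y ∈ rods.drop i, rods[i] ≤ y := by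
      intro y hy
      rw [hdrop] at hy
      rcases List.mem_cons.1 hy with rfl | hy
      · exact le_refl _
      · exact (List.pairwise_cons.1 (hdrop ▸ hsr)).1 y hy
    have hmin_s : ∀ y ∈ sums.drop j, rods[i] ≤ y := by
      intro y hy
      by_cases hjl : j = sums.length
      · subst hjl; simp [List.drop_length] at hy
      · have hc' : i < rods.length ∧ rods.getD i 0 ≤ sums.getD j 0 := by tauto
        have hj' : j < sums.length := lt_of_le_of_ne hj hjl
        have hgs : sums.getD j 0 = sums[j] := List.getD_eq_getElem sums 0 hj'
        have hdrops : sums.drop j = sums[j] :: sums.drop (j + 1) := List.drop_eq_getElem_cons hj'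
        have hle : rods[i] ≤ sums[j] := by rw [← hget, ← hgs]; exact hc'.2
        rw [hdrops] at hy
        rcases List.mem_cons.1 hy with rfl | hy
        · exact hle
        · exact le_trans hle ((List.pairwise_cons.1 (hdrops ▸ hss)).1 y hy)
    refine ⟨by omega, hj, le_refl _, ?_, ?_, ?_, ?_, hss⟩
    · simp only [hget, hdrop]; exact List.mem_append_left _ (List.mem_cons_self)
    · intro y hy
      rw [hget]
      rcases List.mem_append.1 hy with hy | hy
      · exact hmin_r y hy
      · exact hmin_s y hy
    · simp only [hget, hdrop, List.cons_append, List.erase_cons_head]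
    · rw [hdrop] at hsr; exact (List.pairwise_cons.1 hsr).2
  · rw [if_neg hc]
    dsimp only
    push_neg at hc
    obtain ⟨hjl, hcond⟩ := hc
    have hj' : j < sums.length := lt_of_le_of_ne hj hjl
    have hgs : sums.getD j 0 = sums[j] := List.getD_eq_getElem sums 0 hj'
    have hdrops : sums.drop j = sums[j] :: sums.drop (j + 1) := List.drop_eq_getElem_cons hj'
    have hmin_s : ∀ y ∈ sums.drop j, sums[j] ≤ y := by
      intro y hy
      rw [hdrops] at hy
      rcases List.mem_cons.1 hy with rfl | hy
      · exact le_refl _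
      · exact (List.pairwise_cons.1 (hdrops ▸ hss)).1 y hy
    have hss' : (sums.drop (j + 1)).Pairwise (· ≤ ·) := by
      rw [hdrops] at hss; exact (List.pairwise_cons.1 hss).2
    by_cases hil : i < rods.length
    · have hlt : sums[j] < rods[i] := by
        have := hcond hil
        rw [hgs, List.getD_eq_getElem rods 0 hil] at this
        exact this
      have hmin_r : ∀ y ∈ rods.drop i, sums[j] ≤ y := by
        intro y hy
        have hdr : rods.drop i = rods[i] :: rods.drop (i + 1) := List.drop_eq_getElem_cons hil
        rw [hdr] at hy
        rcases List.mem_cons.1 hy with rfl | hy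
        · exact le_of_lt hlt
        · exact le_of_lt (lt_of_lt_of_le hlt ((List.pairwise_cons.1 (hdr ▸ hsr)).1 y hy))
      have hnot : sums[j] ∉ rods.drop i := by
        intro hmem
        have hdr : rods.drop i = rods[i] :: rods.drop (i + 1) := List.drop_eq_getElem_cons hil
        rw [hdr] at hmem
        rcases List.mem_cons.1 hmem with heq | hmem
        · omega
        · have := (List.pairwise_cons.1 (hdr ▸ hsr)).1 _ hmem
          omega
      refine ⟨hi, by omega, by omega, ?_, ?_, ?_, hsr, hss'⟩
      · rw [hgs]; exact List.mem_append_right _ (hdrops ▸ List.mem_cons_self)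
      · intro y hy
        rw [hgs]
        rcases List.mem_append.1 hy with hy | hy
        · exact hmin_r y hy
        · exact hmin_s y hy
      · rw [hgs, List.erase_append_right _ hnot, hdrops, List.erase_cons_head]
    · have hde : rods.drop i = [] := List.drop_eq_nil_of_le (by omega)
      refine ⟨hi, by omega, by omega, ?_, ?_, ?_, by rw [hde]; exact List.Pairwise.nil, hss'⟩
      · rw [hgs, hde]; simp only [List.nil_append]
        exact hdrops ▸ List.mem_cons_self
      · intro y hy
        rw [hde, List.nil_append] at hy
        rw [hgs]; exact hmin_s y hy
      · rw [hgs, hde]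
        simp only [List.nil_append]
        rw [hdrops, List.erase_cons_head]

theorem aLoop_none {l : List Int} (h : heapPop? l = none) (ans : Int) : aLoop l ans = ans := by
  have hl : l = [] := by
    unfold heapPop? at h
    cases hm : PySem.List.min? l (fun x => x) with
    | none => exact (PySem.List.min?_eq_none_iff l _).1 hm
    | some m => rw [hm] at h; exact absurd h (by simp)
  subst hl
  rw [aLoop]
  rw [if_neg (by simp)]
  split
  · rfl
  · next a l1 heq => rw [heq] at h; exact absurd h (by simp)

theorem aLoop_step {l l1 l2 : List Int} {a b : Int} (h1 : heapPop? l = some (a, l1))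
    (h2 : heapPop? l1 = some (b, l2)) (hne : l.length ≠ 1) (ans : Int) :
    aLoop l ans = aLoop (l2 ++ [a + b]) (ans + (a + b)) := by
  rw [aLoop, if_neg hne]
  split
  · next heq => rw [heq] at h1; exact absurd h1 (by simp)
  · next a' l1' heq =>
    rw [heq] at h1
    have hp := Option.some.inj h1
    obtain ⟨rfl, rfl⟩ : a' = a ∧ l1' = l1 :=
      ⟨congrArg Prod.fst hp, congrArg Prod.snd hp⟩
    split
    · next heq2 => rw [heq2] at h2; exact absurd h2 (by simp)
    · next b' l2' heq2 =>
      rw [heq2] at h2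
      have hp2 := Option.some.inj h2
      obtain ⟨rfl, rfl⟩ : b' = b ∧ l2' = l2 :=
        ⟨congrArg Prod.fst hp2, congrArg Prod.snd hp2⟩
      rfl

-- main simulation: A's heap loop equals B's two-cursor loop on any permutation-equivalent state
theorem sim : ∀ (fuel : Nat) (l rods sums : List Int) (i j : Nat) (ans : Int),
    l.length ≤ fuel →
    i ≤ rods.length → j ≤ sums.length →
    l.Perm (rods.drop i ++ sums.drop j) →
    (rods.drop i).Pairwise (· ≤ ·) →
    (sums.drop j).Pairwise (· ≤ ·) →
    (∀ x ∈ sums.drop j, ∀ y ∈ (rods.drop i ++ sums.drop j).erase x, x ≤ 2 * y) →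
    aLoop l ans = bLoop fuel rods sums i j ans := by
  intro fuel
  induction fuel with
  | zero =>
    intro l rods sums i j ans hfuel hi hj hperm hsr hss hK
    have hl : l = [] := List.length_eq_zero_iff.1 (by omega)
    subst hl
    rw [aLoop_none (by unfold heapPop?; rw [(PySem.List.min?_eq_none_iff ([] : List Int) (fun x => x)).2 rfl])]
    rfl
  | succ fuel ih =>
    intro l rods sums i j ans hfuel hi hj hperm hsr hss hK
    have hlenL : (rods.drop i ++ sums.drop j).length = l.length := (List.Perm.length_eq hperm).symm
    have hlen' : (rods.length - i) + (sums.length - j) = l.length := by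
      rw [← hlenL]; simp [List.length_drop]
    by_cases hsmall : l.length ≤ 1
    · -- both loops stop
      have hb : bLoop (fuel + 1) rods sums i j ans = ans := by
        simp only [bLoop]
        rw [if_neg (by omega)]
      rw [hb]
      rcases Nat.le_one_iff_eq_zero_or_eq_one.1 hsmall with h0 | h1
      · have hl : l = [] := List.length_eq_zero_iff.1 h0
        subst hl
        rw [aLoop_none (by unfold heapPop?; rw [(PySem.List.min?_eq_none_iff ([] : List Int) (fun x => x)).2 rfl])]
      · rw [aLoop, if_pos h1]
    · -- at least two live elements
      push_neg at hsmall
      -- A side: pop the two minima a then b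
      obtain ⟨a, hA⟩ : ∃ a, PySem.List.min? l (fun x => x) = some a := by
        cases hm : PySem.List.min? l (fun x => x) with
        | none =>
          have := (PySem.List.min?_eq_none_iff l (fun x => x)).1 hm
          subst this; simp at hsmall
        | some a => exact ⟨a, rfl⟩
      have ha_mem : a ∈ l := PySem.List.min?_mem hA
      have ha_min : ∀ y ∈ l, a ≤ y := by
        have := PySem.List.min?_isMin hA
        simpa using this
      have hp1 : heapPop? l = some (a, l.erase a) := by unfold heapPop?; rw [hA]
      have hlen1 : (l.erase a).length = l.length - 1 := List.length_erase_of_mem ha_mem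
      obtain ⟨b, hB⟩ : ∃ b, PySem.List.min? (l.erase a) (fun x => x) = some b := by
        cases hm : PySem.List.min? (l.erase a) (fun x => x) with
        | none =>
          have hnil := (PySem.List.min?_eq_none_iff (l.erase a) (fun x => x)).1 hm
          rw [hnil] at hlen1
          simp only [List.length_nil] at hlen1
          omega
        | some b => exact ⟨b, rfl⟩
      have hb_mem : b ∈ l.erase a := PySem.List.min?_mem hB
      have hb_min : ∀ y ∈ l.erase a, b ≤ y := by
        have := PySem.List.min?_isMin hB
        simpa using this
      have hab : a ≤ b := ha_min b (List.mem_of_mem_erase hb_mem)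
      have hp2 : heapPop? (l.erase a) = some (b, (l.erase a).erase b) := by
        unfold heapPop?; rw [hB]
      have hAstep : aLoop l ans = aLoop ((l.erase a).erase b ++ [a + b]) (ans + (a + b)) :=
        aLoop_step hp1 hp2 (by omega) ans
      -- B side: the first pick
      have hneL : rods.drop i ++ sums.drop j ≠ [] := by
        intro h; rw [h] at hlenL; simp at hlenL; omega
      obtain ⟨ht1i, ht1j, ht1jle, ht1mem, ht1min, ht1erase, ht1sr, ht1ss⟩ :=
        takeMin_spec rods sums i j hi hj hsr hss hneL
      set t1 := takeMin rods sums i j with ht1def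
      have hv1a : t1.1 = a := by
        have h1 : a ≤ t1.1 := ha_min _ ((List.Perm.mem_iff hperm).2 ht1mem)
        have h2 : t1.1 ≤ a := ht1min a ((List.Perm.mem_iff hperm).1 ha_mem)
        omega
      have hL1eq : rods.drop t1.2.1 ++ sums.drop t1.2.2 = (rods.drop i ++ sums.drop j).erase a := by
        rw [ht1erase, hv1a]
      have hperm1 : (l.erase a).Perm (rods.drop t1.2.1 ++ sums.drop t1.2.2) := by
        rw [hL1eq]; exact hperm.erase a
      -- second pick
      have hneL1 : rods.drop t1.2.1 ++ sums.drop t1.2.2 ≠ [] := by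
        intro h
        have hz := List.Perm.length_eq hperm1
        rw [h] at hz
        simp only [List.length_nil] at hz
        omega
      obtain ⟨ht2i, ht2j, ht2jle, ht2mem, ht2min, ht2erase, ht2sr, ht2ss⟩ :=
        takeMin_spec rods sums t1.2.1 t1.2.2 ht1i ht1j ht1sr ht1ss hneL1
      set t2 := takeMin rods sums t1.2.1 t1.2.2 with ht2def
      have hv2b : t2.1 = b := by
        have h1 : b ≤ t2.1 := hb_min _ ((List.Perm.mem_iff hperm1).2 ht2mem)
        have h2 : t2.1 ≤ b := ht2min b ((List.Perm.mem_iff hperm1).1 hb_mem)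
        omega
      have hL2eq : rods.drop t2.2.1 ++ sums.drop t2.2.2
          = ((rods.drop i ++ sums.drop j).erase a).erase b := by
        rw [ht2erase, hv2b, hL1eq]
      have hperm2 : ((l.erase a).erase b).Perm (rods.drop t2.2.1 ++ sums.drop t2.2.2) := by
        rw [hL2eq]; exact (hperm.erase a).erase b
      -- facts about survivors of the old sums queue
      have hjle : j ≤ t2.2.2 := le_trans ht1jle ht2jle
      have hsurv : ∀ x ∈ sums.drop t2.2.2, b ≤ x ∧ x ≤ 2 * a := by
        intro x hx
        have hxL2 : x ∈ rods.drop t2.2.1 ++ sums.drop t2.2.2 := List.mem_append_right _ hx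
        rw [hL2eq] at hxL2
        have hxL1 : x ∈ (rods.drop i ++ sums.drop j).erase a := List.mem_of_mem_erase hxL2
        have hbx : b ≤ x := hb_min x ((List.Perm.mem_iff (hperm.erase a)).2 hxL1)
        have hxold : x ∈ sums.drop j := drop_subset_drop hjle hx
        have haL : a ∈ rods.drop i ++ sums.drop j := (List.Perm.mem_iff hperm).1 ha_mem
        have haLx : a ∈ (rods.drop i ++ sums.drop j).erase x :=
          mem_erase_comm_of_mem haL hxL1
        exact ⟨hbx, hK x hxold a haLx⟩
      have hxle_s : ∀ x ∈ sums.drop t2.2.2, x ≤ a + b := by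
        intro x hx
        obtain ⟨h1, h2⟩ := hsurv x hx
        omega
      -- invariant for the next state
      have hjnew : t2.2.2 ≤ (sums ++ [a + b]).length := by
        simp only [List.length_append, List.length_cons, List.length_nil]; omega
      have hdropnew : (sums ++ [a + b]).drop t2.2.2 = sums.drop t2.2.2 ++ [a + b] :=
        List.drop_append_of_le_length ht2j
      have hpermnew : ((l.erase a).erase b ++ [a + b]).Perm
          (rods.drop t2.2.1 ++ (sums ++ [a + b]).drop t2.2.2) := by
        rw [hdropnew, ← List.append_assoc]
        exact hperm2.append_right [a + b]
      have hssnew : ((sums ++ [a + b]).drop t2.2.2).Pairwise (· ≤ ·) := by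
        rw [hdropnew]
        rw [List.pairwise_append]
        refine ⟨ht2ss, List.pairwise_singleton _ _, ?_⟩
        intro x hx y hy
        simp only [List.mem_singleton] at hy
        subst hy
        exact hxle_s x hx
      have hKnew : ∀ x ∈ (sums ++ [a + b]).drop t2.2.2,
          ∀ y ∈ (rods.drop t2.2.1 ++ (sums ++ [a + b]).drop t2.2.2).erase x, x ≤ 2 * y := by
        rw [hdropnew, ← List.append_assoc]
        intro x hx y hy
        set L2 := rods.drop t2.2.1 ++ sums.drop t2.2.2 with hL2def
        rcases List.mem_append.1 hx with hxold | hxs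
        · -- x is a surviving old sum
          obtain ⟨hbx, hx2a⟩ := hsurv x hxold
          have hxL2 : x ∈ L2 := List.mem_append_right _ hxold
          rw [List.erase_append_left _ hxL2] at hy
          rcases List.mem_append.1 hy with hy' | hy'
          · -- y is an old live element
            have hyLx : y ∈ (rods.drop i ++ sums.drop j).erase x := by
              rw [hL2eq] at hy'
              exact mem_erase_of_mem_erase_erase (mem_erase_of_mem_erase_erase hy')
            exact hK x (drop_subset_drop hjle hxold) y hyLx
          · -- y is the new sum a + b
            simp only [List.mem_singleton] at hy'
            subst hy'
            omega
        · -- x is the new sum a + b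
          simp only [List.mem_singleton] at hxs
          subst hxs
          have hyL2 : y ∈ L2 := mem_append_singleton_erase_self hy
          rw [hL2eq] at hyL2
          have hby : b ≤ y := hb_min y ((List.Perm.mem_iff (hperm.erase a)).2
            (List.mem_of_mem_erase hyL2))
          have hay : a ≤ y := ha_min y
            ((List.Perm.mem_iff hperm).2
              (List.mem_of_mem_erase (List.mem_of_mem_erase hyL2)))
          omega
      have hlen2 : ((l.erase a).erase b ++ [a + b]).length = l.length - 1 := by
        have := List.length_erase_of_mem hb_mem
        simp only [List.length_append, List.length_cons, List.length_nil]
        omega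
      have hBstep : bLoop (fuel + 1) rods sums i j ans
          = bLoop fuel rods (sums ++ [a + b]) t2.2.1 t2.2.2 (ans + (a + b)) := by
        simp only [bLoop]
        rw [if_pos (by omega)]
        rw [← ht1def, ← ht2def, hv1a, hv2b]
      rw [hAstep, hBstep]
      exact ih ((l.erase a).erase b ++ [a + b]) rods (sums ++ [a + b]) t2.2.1 t2.2.2
        (ans + (a + b)) (by omega) ht2i hjnew hpermnew ht2sr hssnew hKnew

-- ===== VERDICT (by name: the statement is the Claim_ definition above) =====
theorem min_cost_to_connect_rods_spec : Claim_equal_min_cost_to_connect_rods := by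
  intro arr N _ _
  unfold Spec_min_cost_to_connect_rods min_cost_to_connect_rods min_cost_to_connect_rods_alt
  apply sim
  · exact le_refl _
  · omega
  · omega
  · simpa using (PySem.List.sorted_perm arr (fun x => x) false).symm
  · simpa using PySem.List.sorted_pairwise arr (fun x => x)
  · simp
  · simp
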